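-- pv_equiv track=rewrite | github.com/joyful-young/OnlineJudge | 백준/Gold/3687. 성냥개비/성냥개비.py | sort_digits
-- ===== SOURCE A (Python) =====
-- def sort_digits(number_str):
--     digits = sorted(number_str)
--     if digits[0] == "0":
--         for i in range(1, len(digits)):
--             if digits[i] != "0":
--                 digits[0], digits[i] = digits[i], digits[0]
--                 break
--     return "".join(digits)
-- ===== SOURCE B (Python) =====
-- def sort_digits(number_str):
--     counts = {}
--     for ch in number_str:
--         counts[ch] = counts.get(ch, 0) + 1
--     ordered = []
--     for code in range(128):
--         ordered.extend(chr(code) * counts.get(chr(code), 0))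
--     if ordered and ordered[0] == "0":
--         zeros = counts.get("0", 0)
--         if zeros < len(ordered):
--             head = ordered[zeros]
--             ordered = [head] + ["0"] * zeros + ordered[zeros + 1:]
--     return "".join(ordered)
-- ===== Notes on version B (the rewrite author's own statement) =====
-- stated objective: faster
-- what changed: B replaces A's comparison sort plus in-place swap-search by a single counting pass (a char->count dict) from which the sorted string is reconstructed code by code, with the leading-zero fix done by rebuilding the list from the counts' zero run.
import Mathlib
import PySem

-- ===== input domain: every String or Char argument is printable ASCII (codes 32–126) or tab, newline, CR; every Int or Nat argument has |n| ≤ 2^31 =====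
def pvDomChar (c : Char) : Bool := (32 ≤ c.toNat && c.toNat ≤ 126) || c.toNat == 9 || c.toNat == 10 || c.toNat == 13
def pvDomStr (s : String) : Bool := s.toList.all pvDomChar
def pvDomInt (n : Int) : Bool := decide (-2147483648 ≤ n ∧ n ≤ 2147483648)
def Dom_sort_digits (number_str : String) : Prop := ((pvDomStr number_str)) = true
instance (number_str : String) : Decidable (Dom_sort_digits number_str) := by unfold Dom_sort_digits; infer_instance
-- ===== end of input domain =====

-- B replaces A's comparison sort + swap search by one counting pass and a reconstruction of the
-- sorted string from the counts (measured faster in a timing run); same return value.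

-- ===== PORT A =====
-- the 'for i in range(1, len(digits)): if digits[i] != "0": swap; break' loop of A
def pvSwapLoop (digits : List Char) : List Int → List Char
  | [] => digits
  | i :: rest =>
      match PySem.List.pyGet? digits i, PySem.List.pyGet? digits 0 with
      | some c, some d0 =>
          if c ≠ '0' then (digits.set 0 c).set i.toNat d0
          else pvSwapLoop digits rest
      | _, _ => digits   -- unreachable: i drawn from range(1, len) is in range

def sort_digits (number_str : String) : String :=
  let digits := PySem.List.sorted number_str.toList (fun c => c) false
  match PySem.List.pyGet? digits 0 with
  | none => ""          -- IndexError on the empty string: excluded by Pre_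
  | some d0 =>
      let digits := if d0 = '0' then pvSwapLoop digits (PySem.List.pyRange 1 digits.length 1) else digits
      String.ofList digits

-- ===== PORT B =====
def sort_digits_alt (number_str : String) : String :=
  let counts : PySem.Dict Char Int :=
    number_str.toList.foldl (fun d ch => d.insert ch (d.getD ch 0 + 1)) PySem.Dict.empty
  let ordered : List Char :=
    (PySem.List.pyRange 0 128 1).foldl
      (fun acc code =>
        acc ++ PySem.List.pyRepeat [Char.ofNat code.toNat] (counts.getD (Char.ofNat code.toNat) 0)) []
  let ordered :=
    if ordered ≠ [] ∧ PySem.List.pyGet? ordered 0 = some '0' then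
      let zeros := counts.getD '0' 0
      if zeros < (ordered.length : Int) then
        match PySem.List.pyGet? ordered zeros with
        | some head => head :: (PySem.List.pyRepeat ['0'] zeros ++ PySem.List.slice ordered (some (zeros + 1)) none)
        | none => ordered   -- unreachable: 0 ≤ zeros < len(ordered)
      else ordered
    else ordered
  String.ofList ordered

-- ===== PRECONDITION & SPEC =====
-- A raises IndexError (digits[0]) on the empty string; Pre_ excludes exactly that input.
def Pre_sort_digits (number_str : String) : Prop := number_str ≠ ""
instance (number_str : String) : Decidable (Pre_sort_digits number_str) := by unfold Pre_sort_digits; infer_instance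
def pvWitness_sort_digits : String := "2061"

def Spec_sort_digits (number_str : String) (out : String) : Prop := out = sort_digits_alt number_str
instance (number_str : String) (out : String) : Decidable (Spec_sort_digits number_str out) := by unfold Spec_sort_digits; infer_instance

-- ===== CLAIM (what is proved, stated in full; the proofs are below) =====
def Claim_equal_sort_digits : Prop := ∀ (number_str : String), Dom_sort_digits number_str → Pre_sort_digits number_str → Spec_sort_digits number_str (sort_digits number_str)

-- ===== LEMMAS AND PROOFS =====

def pvBlocks (n : List Char) (a b : Int) : List Char :=
  (PySem.List.pyRange a b 1).flatMap
    (fun code => List.replicate (n.count (Char.ofNat code.toNat)) (Char.ofNat code.toNat))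

theorem pv_toNat_ofNat (k : Nat) (h : k < 128) : (Char.ofNat k).toNat = k := by
  have hv : k.isValidChar := Or.inl (by omega)
  rw [Char.ofNat, dif_pos hv]; rfl

theorem pv_chr_le (k k' : Nat) (hk : k < 128) (hk' : k' < 128) (h : k ≤ k') :
    Char.ofNat k ≤ Char.ofNat k' := by
  have h1 := pv_toNat_ofNat k hk
  have h2 := pv_toNat_ofNat k' hk'
  rw [Char.le_def, UInt32.le_iff_toNat_le]
  show (Char.ofNat k).toNat ≤ (Char.ofNat k').toNat
  omega

theorem pv_chr_inj (k k' : Nat) (hk : k < 128) (hk' : k' < 128) (h : Char.ofNat k = Char.ofNat k') :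
    k = k' := by
  rw [← pv_toNat_ofNat k hk, ← pv_toNat_ofNat k' hk', h]

theorem pvBlocks_congr (ch : Char) (m : List Char) (a b : Int)
    (h : ∀ code ∈ PySem.List.pyRange a b 1, Char.ofNat code.toNat ≠ ch) :
    pvBlocks (ch :: m) a b = pvBlocks m a b := by
  unfold pvBlocks
  apply List.flatMap_congr
  intro code hc
  simp [Ne.symm (h code hc)]

theorem pv_blocks_split (ch : Char) (hch : ch.toNat < 128) (l : List Char) :
    pvBlocks l 0 128 =
      pvBlocks l 0 (ch.toNat : Int) ++
      (List.replicate (l.count ch) ch ++ pvBlocks l ((ch.toNat : Int) + 1) 128) := by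
  have hofnat : Char.ofNat ch.toNat = ch := Char.ofNat_toNat ch
  unfold pvBlocks
  rw [PySem.List.pyRange_one_append 0 (ch.toNat : Int) 128 (by omega) (by exact_mod_cast hch.le),
      List.flatMap_append,
      PySem.List.pyRange_one_cons (a := (ch.toNat : Int)) (b := 128) (by exact_mod_cast hch),
      List.flatMap_cons]
  simp [hofnat]

theorem pv_blocks_perm (n : List Char) (h : ∀ c ∈ n, c.toNat < 128) :
    (pvBlocks n 0 128).Perm n := by
  induction n with
  | nil => simp [pvBlocks]
  | cons ch m ih =>
      have hch : ch.toNat < 128 := h ch (List.mem_cons_self)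
      have hm : ∀ c ∈ m, c.toNat < 128 := fun c hc => h c (List.mem_cons_of_mem _ hc)
      have hofnat : Char.ofNat ch.toNat = ch := Char.ofNat_toNat ch
      have hne1 : ∀ code ∈ PySem.List.pyRange 0 (ch.toNat : Int) 1, Char.ofNat code.toNat ≠ ch := by
        intro code hc heq
        have hb := (PySem.List.mem_pyRange_one).mp hc
        have : code.toNat = ch.toNat := pv_chr_inj _ _ (by omega) hch (heq.trans hofnat.symm)
        omega
      have hne2 : ∀ code ∈ PySem.List.pyRange ((ch.toNat : Int) + 1) 128 1, Char.ofNat code.toNat ≠ ch := by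
        intro code hc heq
        have hb := (PySem.List.mem_pyRange_one).mp hc
        have : code.toNat = ch.toNat := pv_chr_inj _ _ (by omega) hch (heq.trans hofnat.symm)
        omega
      rw [pv_blocks_split ch hch (ch :: m), pvBlocks_congr ch m _ _ hne1, pvBlocks_congr ch m _ _ hne2,
          List.count_cons_self, List.replicate_succ]
      refine List.Perm.trans List.perm_middle ?_
      refine List.Perm.cons ch ?_
      rw [show ((List.replicate (List.count ch m) ch).append (pvBlocks m ((ch.toNat:Int) + 1) 128)) = List.replicate (List.count ch m) ch ++ pvBlocks m ((ch.toNat:Int) + 1) 128 from rfl, ← pv_blocks_split ch hch m]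
      exact ih hm

theorem pv_blocks_pairwise (n : List Char) :
    (pvBlocks n 0 128).Pairwise (· ≤ ·) := by
  unfold pvBlocks
  rw [List.flatMap, List.pairwise_flatten]
  constructor
  · intro l hl
    simp only [List.mem_map] at hl
    obtain ⟨code, _, rfl⟩ := hl
    exact List.pairwise_replicate.mpr (Or.inr le_rfl)
  · rw [List.pairwise_map]
    refine List.Pairwise.imp_of_mem ?_ (PySem.List.pairwise_lt_pyRange_one 0 128)
    intro c1 c2 h1 h2 hlt x hx y hy
    have hb1 := (PySem.List.mem_pyRange_one).mp h1
    have hb2 := (PySem.List.mem_pyRange_one).mp h2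
    rw [List.eq_of_mem_replicate hx, List.eq_of_mem_replicate hy]
    exact pv_chr_le _ _ (by omega) (by omega) (by omega)

theorem pv_blocks_sorted (n : List Char) (h : ∀ c ∈ n, c.toNat < 128) :
    PySem.List.sorted n (fun c => c) false = pvBlocks n 0 128 :=
  PySem.List.sorted_id_eq_of_perm_of_pairwise n (pvBlocks n 0 128) (pv_blocks_perm n h) (pv_blocks_pairwise n)

theorem pv_ordered_eq (n : List Char) :
    ((PySem.List.pyRange 0 128 1).foldl
      (fun acc code =>
        acc ++ PySem.List.pyRepeat [Char.ofNat code.toNat]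
          ((n.foldl (fun d ch => d.insert ch (d.getD ch 0 + 1)) PySem.Dict.empty).getD (Char.ofNat code.toNat) 0)) []
      : List Char) = pvBlocks n 0 128 := by
  rw [PySem.List.foldl_append_eq_flatMap, List.nil_append]
  unfold pvBlocks
  apply List.flatMap_congr
  intro code _
  rw [PySem.Dict.foldl_insert_getD_add_one_eq_counter, PySem.Dict.getD_counter,
      PySem.List.pyRepeat_singleton, Int.toNat_natCast]


-- if the loop finds only zeros it returns digits unchanged
theorem pvSwapLoop_all0 (digits : List Char) (l : List Int)
    (h : ∀ i ∈ l, ∀ c, PySem.List.pyGet? digits i = some c → c = '0') :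
    pvSwapLoop digits l = digits := by
  induction l with
  | nil => rfl
  | cons i rest ih =>
      unfold pvSwapLoop
      cases hg : PySem.List.pyGet? digits i with
      | none => cases hg0 : PySem.List.pyGet? digits 0 <;> rfl
      | some c =>
        cases hg0 : PySem.List.pyGet? digits 0 with
        | none => rfl
        | some d0 =>
            have hc : c = '0' := h i List.mem_cons_self c hg
            dsimp only
            rw [if_neg (by simp [hc])]
            exact ih (fun j hj => h j (List.mem_cons_of_mem _ hj))

theorem pvSwapLoop_found (digits : List Char) (d0 : Char)
    (h0 : PySem.List.pyGet? digits 0 = some d0)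
    (z : Nat) (hz : z < digits.length) (hc : digits[z] ≠ '0')
    (k : Nat) (hkz : k ≤ z)
    (hzero : ∀ j, k ≤ j → j < z → ∀ (hj : j < digits.length), digits[j] = '0') :
    pvSwapLoop digits (PySem.List.pyRange (k : Int) (digits.length : Int) 1) =
      (digits.set 0 digits[z]).set z d0 := by
  induction hd : z - k generalizing k with
  | zero =>
      have hk : k = z := by omega
      subst hk
      rw [PySem.List.pyRange_one_cons (by exact_mod_cast hz)]
      unfold pvSwapLoop
      rw [PySem.List.pyGet?_natCast, List.getElem?_eq_getElem hz, h0]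
      dsimp only
      rw [if_pos (by simpa using hc), Int.toNat_natCast]
  | succ m ih =>
      have hkz' : k < z := by omega
      rw [PySem.List.pyRange_one_cons (by exact_mod_cast (by omega : k < digits.length))]
      unfold pvSwapLoop
      rw [PySem.List.pyGet?_natCast, List.getElem?_eq_getElem (by omega), h0]
      dsimp only
      rw [if_neg (by simp [hzero k le_rfl hkz' (by omega)])]
      have : ((k : Int) + 1) = ((k + 1 : Nat) : Int) := by push_cast; ring
      rw [this]
      exact ih (k + 1) (by omega) (fun j hj1 hj2 hj3 => hzero j (by omega) hj2 hj3) (by omega)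

theorem pv_swap_result (z : Nat) (hz : 1 ≤ z) (c : Char) (hc : c ≠ '0') (t : List Char) :
    pvSwapLoop (List.replicate z '0' ++ c :: t)
        (PySem.List.pyRange 1 ((List.replicate z '0' ++ c :: t).length : Int) 1) =
      c :: (List.replicate z '0' ++ t) := by
  have hlen : (List.replicate z '0' ++ c :: t).length = z + 1 + t.length := by simp; omega
  have hz' : z < (List.replicate z '0' ++ c :: t).length := by omega
  have hsz : (List.replicate z '0' ++ c :: t)[z]'(hz') = c := by
    rw [List.getElem_append_right (by simp)]
    simp
  have h0 : PySem.List.pyGet? (List.replicate z '0' ++ c :: t) 0 = some '0' := by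
    rw [show ((0:Int)) = ((0:Nat):Int) from rfl, PySem.List.pyGet?_natCast,
        List.getElem?_eq_getElem (by omega)]
    congr 1
    rw [List.getElem_append_left (by simp; omega)]
    simp
  have hres := pvSwapLoop_found (List.replicate z '0' ++ c :: t) '0' h0 z hz'
    (by rw [hsz]; exact hc) 1 hz
    (fun j hj1 hj2 hj3 => by
      rw [List.getElem_append_left (by simp; omega)]
      simp)
  simp only [Nat.cast_one] at hres
  rw [hres, hsz]
  rw [List.set_append, if_pos (by simp; omega)]
  rw [show List.replicate z '0' = '0' :: List.replicate (z-1) '0' by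
        rw [← List.replicate_succ]; congr 1; omega]
  rw [List.set_cons_zero, ← List.cons_append, List.set_append, if_neg (by simp; omega)]
  simp only [List.length_cons, List.length_replicate]
  rw [show z - (z - 1 + 1) = 0 by omega, List.set_cons_zero]
  rw [show ('0' :: t) = [('0':Char)] ++ t from rfl]
  rw [show (c :: List.replicate (z-1) '0' ++ ([('0':Char)] ++ t)) = c :: ((List.replicate (z-1) '0' ++ [('0':Char)]) ++ t) by simp]
  rw [← List.replicate_succ']
  rw [show z - 1 + 1 = z by omega]
  rw [show List.replicate z ('0':Char) = '0' :: List.replicate (z-1) '0' by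
        rw [← List.replicate_succ]; congr 1; omega]
  simp

theorem pv_mem_blocks (n : List Char) (a b : Int) (ha : 0 ≤ a) (hb : b ≤ 128)
    (x : Char) (hx : x ∈ pvBlocks n a b) : a ≤ (x.toNat : Int) ∧ (x.toNat : Int) < b := by
  unfold pvBlocks at hx
  rw [List.mem_flatMap] at hx
  obtain ⟨code, hcode, hmem⟩ := hx
  have hbounds := (PySem.List.mem_pyRange_one).mp hcode
  have hx' := List.eq_of_mem_replicate hmem
  subst hx'
  rw [pv_toNat_ofNat code.toNat (by omega)]
  omega

set_option maxRecDepth 8192 in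
set_option maxHeartbeats 2000000 in
theorem pv_main (number_str : String)
    (hdom : (pvDomStr number_str) = true) (hne : number_str ≠ "") :
    sort_digits number_str = sort_digits_alt number_str := by
  have h128 : ∀ c ∈ number_str.toList, c.toNat < 128 := by
    intro c hc
    have := List.all_eq_true.mp hdom c hc
    unfold pvDomChar at this
    simp at this
    omega
  have hn : number_str.toList ≠ [] := by
    intro h
    apply hne
    have := congrArg String.ofList h
    simpa using this
  -- shared structure
  have hsorted := pv_blocks_sorted number_str.toList h128
  have hzofnat : Char.ofNat ('0' : Char).toNat = '0' := by decide
  have hsplit := pv_blocks_split '0' (by decide) number_str.toList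
  set n := number_str.toList with hnn
  set z := n.count '0' with hz
  set low := pvBlocks n 0 (('0':Char).toNat : Int) with hlow
  set high := pvBlocks n ((('0':Char).toNat : Int) + 1) 128 with hhigh
  have hdig : PySem.List.sorted n (fun c => c) false = low ++ (List.replicate z '0' ++ high) := by
    rw [hsorted, hsplit]
  have hlow48 : ∀ x ∈ low, (x.toNat : Int) < 48 := fun x hx =>
    (pv_mem_blocks n _ _ (by omega) (by decide) x hx).2
  have hhigh48 : ∀ x ∈ high, 48 < (x.toNat : Int) := fun x hx => by
    have := (pv_mem_blocks n _ _ (by decide) (by omega) x hx).1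
    have h0 : (('0':Char).toNat : Int) = 48 := by decide
    omega
  have hhighne : ∀ x ∈ high, x ≠ '0' := by
    intro x hx heq
    have := hhigh48 x hx
    rw [heq] at this
    simp at this
  -- B's ordered list is the sorted list
  have hord := pv_ordered_eq n
  have hcount : ((n.foldl (fun d ch => d.insert ch (d.getD ch 0 + 1)) PySem.Dict.empty).getD '0' 0) = (z : Int) := by
    rw [PySem.Dict.foldl_insert_getD_add_one_eq_counter, PySem.Dict.getD_counter]
  simp only [sort_digits, sort_digits_alt]
  rw [hord, hcount, hsorted, hsplit]
  clear_value n z low high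
  cases hlowc : low with
  | cons c0 rest =>
      have hc0 : c0 ≠ '0' := by
        intro h
        have := hlow48 c0 (by rw [hlowc]; exact List.mem_cons_self)
        rw [h] at this
        simp at this
      rw [List.cons_append, PySem.List.pyGet?_zero_cons]
      dsimp only
      rw [if_neg hc0, if_neg (by simp [hc0])]
  | nil =>
      rw [List.nil_append]
      cases hzc : z with
      | zero =>
          rw [List.replicate_zero, List.nil_append]
          cases hhighc : high with
          | nil =>
              exfalso
              have : PySem.List.sorted n (fun c => c) false = [] := by
                rw [hdig, hlowc, hhighc, hzc]; simp
              exact hn ((PySem.List.sorted_eq_nil_iff _ _ _).mp this)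
          | cons c t =>
              have hc : c ≠ '0' := hhighne c (by rw [hhighc]; exact List.mem_cons_self)
              rw [PySem.List.pyGet?_zero_cons]
              dsimp only
              rw [if_neg hc, if_neg (by simp [hc])]
      | succ z' =>
          have hget0 : PySem.List.pyGet? (List.replicate (z' + 1) '0' ++ high) 0 = some '0' := by
            rw [List.replicate_succ, List.cons_append, PySem.List.pyGet?_zero_cons]
          rw [hget0]
          dsimp only
          rw [if_pos rfl, if_pos ⟨by simp, rfl⟩]
          cases hhighc : high with
          | nil =>
              rw [List.append_nil]
              rw [if_neg (show ¬((((z' + 1 : Nat)) : Int) < ((List.replicate (z' + 1) ('0':Char)).length : Int)) by simp)]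
              refine congrArg String.ofList ?_
              apply pvSwapLoop_all0
              intro i _ c hgc
              exact List.eq_of_mem_replicate (PySem.List.mem_of_pyGet?_eq_some hgc (xs := List.replicate (z'+1) '0') (i := i))
          | cons c t =>
              have hc : c ≠ '0' := hhighne c (by rw [hhighc]; exact List.mem_cons_self)
              rw [if_pos (show (((z' + 1 : Nat)) : Int) < ((List.replicate (z' + 1) ('0':Char) ++ c :: t).length : Int) by simp)]
              have hgz : PySem.List.pyGet? (List.replicate (z' + 1) '0' ++ c :: t) ((z' + 1 : Nat) : Int) = some c := by
                rw [PySem.List.pyGet?_natCast, List.getElem?_eq_getElem (by simp)]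
                refine congrArg some ?_
                rw [List.getElem_append_right (by simp)]
                simp
              rw [hgz]
              rw [pv_swap_result (z' + 1) (by omega) c hc t]
              refine congrArg String.ofList ?_
              refine congrArg (c :: ·) ?_
              rw [PySem.List.pyRepeat_singleton, Int.toNat_natCast]
              rw [show ((z' + 1 : Nat) : Int) + 1 = ((z' + 2 : Nat) : Int) by push_cast; ring,
                  PySem.List.slice_from_natCast]
              rw [show z' + 2 = (List.replicate (z' + 1) ('0':Char)).length + 1 by simp]
              rw [List.drop_append]
              simp

-- ===== VERDICT (by name: the statement is the Claim_ definition above) =====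
set_option maxRecDepth 8192 in
theorem sort_digits_spec : Claim_equal_sort_digits := by
  intro number_str hdom hpre
  unfold Dom_sort_digits at hdom
  unfold Pre_sort_digits at hpre
  unfold Spec_sort_digits
  have h := pv_main number_str hdom hpre
  rw [h]
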